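-- pv_equiv track=rewrite | github.com/atlimp/aoc | 2025/day10/p1.py | parse_light
-- ===== SOURCE A (Python) =====
-- def parse_light(light):
--     result = 0
--     for i in range(len(light) - 1, -1, -1):
--         result = result << 1
--         token = light[i]
--         if token == '#':
--             result += 1
--
--     return result
-- ===== SOURCE B (Python) =====
-- def parse_light(light):
--     # direct weighted sum: character at index i contributes bit 2^i
--     return sum(1 << i for i, c in enumerate(light) if c == '#')
-- ===== Notes on version B (the rewrite author's own statement) =====
-- stated objective: idiomatic
-- what changed: Replaces the reverse-index shift-and-add accumulator loop with a direct sum of 1 << i over enumerate(light) filtered to '#' characters.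
import Mathlib
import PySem

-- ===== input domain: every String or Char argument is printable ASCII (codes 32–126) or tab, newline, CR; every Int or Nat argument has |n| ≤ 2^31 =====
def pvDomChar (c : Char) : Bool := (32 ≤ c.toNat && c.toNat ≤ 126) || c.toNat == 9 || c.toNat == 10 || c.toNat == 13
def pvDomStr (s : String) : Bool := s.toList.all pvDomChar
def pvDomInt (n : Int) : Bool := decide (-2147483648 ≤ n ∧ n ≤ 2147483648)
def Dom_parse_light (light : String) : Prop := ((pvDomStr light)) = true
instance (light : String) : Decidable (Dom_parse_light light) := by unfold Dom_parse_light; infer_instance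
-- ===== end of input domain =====

-- B replaces A's reverse-index shift-and-add loop by a direct sum of 2^i over the '#' positions (idiomatic; same cost).


-- ===== PORT A =====
-- 'result << 1' is ported as 'result * 2' (exact for Python's left shift on ints);
-- 'light[i]' via PySem.List.pyGet? (the 'none' branch is unreachable: i is always in range).
def parse_light (light : String) : Int :=
  (PySem.List.pyRange ((light.toList.length : Int) - 1) (-1) (-1)).foldl
    (fun result i =>
      let result := result * 2
      match PySem.List.pyGet? light.toList i with
      | some token => if token = '#' then result + 1 else result
      | none => result) 0

-- ===== PORT B =====
-- sum(1 << i for i, c in enumerate(light) if c == '#')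
def parse_light_alt (light : String) : Int :=
  (((PySem.List.enumerate light.toList).filter (fun p => p.2 == '#')).map
    (fun p => (2 : Int) ^ p.1.toNat)).sum

-- ===== PRECONDITION & SPEC =====
def Spec_parse_light (light : String) (out : Int) : Prop := out = parse_light_alt light
instance (light : String) (out : Int) : Decidable (Spec_parse_light light out) := by unfold Spec_parse_light; infer_instance

-- ===== CLAIM (what is proved, stated in full; the proofs are below) =====
def Claim_equal_parse_light : Prop := ∀ (light : String), Dom_parse_light light → Spec_parse_light light (parse_light light)

-- ===== LEMMAS AND PROOFS =====

-- the common specification: bit i is set iff character i is '#'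
def pvBits : List Char → Int
  | [] => 0
  | c :: cs => (if c = '#' then 1 else 0) + 2 * pvBits cs

-- the descending index list A iterates over
lemma pvRangeDesc (n : Nat) :
    PySem.List.pyRange ((n : Int) - 1) (-1) (-1)
      = (List.range n).map (fun k : Nat => (n : Int) - 1 - (k : Int)) := by
  unfold PySem.List.pyRange
  simp only [show ((-1:Int) = 0) = False from by simp, if_false]
  norm_num
  rcases Nat.eq_zero_or_pos n with h | h
  · subst h; simp
  · rw [if_pos (by omega)]
    simp [sub_eq_add_neg]

lemma pvGetSucc {α : Type} (x : α) (xs : List α) (i : Int) (h : 0 ≤ i) :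
    PySem.List.pyGet? (x :: xs) (i + 1) = PySem.List.pyGet? xs i := by
  have : i = ((i.toNat : Nat) : Int) := by omega
  rw [this, PySem.List.pyGet?_cons_succ]

-- A's fold computes pvBits (accumulator generalized)
lemma pvFoldA (cs : List Char) (a : Int) :
    (List.foldl
      (fun result i =>
        let result := result * 2
        match PySem.List.pyGet? cs i with
        | some token => if token = '#' then result + 1 else result
        | none => result) a
      ((List.range cs.length).map (fun k : Nat => (cs.length : Int) - 1 - (k : Int))))
      = a * 2 ^ cs.length + pvBits cs := by
  induction cs generalizing a with
  | nil => simp [pvBits]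
  | cons c rest ih =>
    have hlen : (c :: rest).length = rest.length + 1 := rfl
    rw [hlen, List.range_succ, List.map_append, List.foldl_append]
    rw [List.foldl_map, List.foldl_map] at *
    have hcong :
        List.foldl (fun s (k : Nat) => (fun result i =>
          let result := result * 2
          match PySem.List.pyGet? (c :: rest) i with
          | some token => if token = '#' then result + 1 else result
          | none => result) s (((rest.length + 1 : Nat) : Int) - 1 - k)) a (List.range rest.length)
        = List.foldl (fun s (k : Nat) => (fun result i =>
          let result := result * 2
          match PySem.List.pyGet? rest i with
          | some token => if token = '#' then result + 1 else result
          | none => result) s (((rest.length : Nat) : Int) - 1 - k)) a (List.range rest.length) := by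
      apply PySem.List.foldl_congr_mem
      intro s k hk
      have hk' : (k : Nat) < rest.length := List.mem_range.mp hk
      have h1 : ((rest.length + 1 : Nat) : Int) - 1 - k = (((rest.length : Nat) : Int) - 1 - k) + 1 := by
        push_cast; ring
      simp only [h1]
      simp only [pvGetSucc c rest ((rest.length : Int) - 1 - (k : Int)) (by omega)]
    rw [hcong]
    have hinner := ih a
    rw [List.foldl_map] at hinner
    rw [hinner]
    have h0 : ((rest.length + 1 : Nat) : Int) - 1 - (rest.length : Int) = 0 := by push_cast; ring
    simp only [List.foldl_cons, List.foldl_nil, h0]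
    simp only [PySem.List.pyGet?, PySem.List.pyIdx?]
    norm_num [pvBits]
    split_ifs <;> ring

-- B's sum computes pvBits (start offset generalized)
lemma pvSumB (cs : List Char) (s : Int) (hs : 0 ≤ s) :
    (((PySem.List.enumerate cs s).filter (fun p => p.2 == '#')).map
      (fun p => (2 : Int) ^ p.1.toNat)).sum = 2 ^ s.toNat * pvBits cs := by
  induction cs generalizing s with
  | nil => simp [pvBits, PySem.List.enumerate]
  | cons c cs ih =>
    rw [PySem.List.enumerate_cons, List.filter_cons]
    have htn : (s + 1).toNat = s.toNat + 1 := by omega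
    by_cases hc : c = '#'
    · simp only [hc, beq_self_eq_true, if_pos, List.map_cons, List.sum_cons,
        ih (s + 1) (by omega), htn, pvBits]
      ring
    · simp only [show (c == '#') = false from by simp [hc], Bool.false_eq_true, if_false,
        ih (s + 1) (by omega), htn, pvBits, hc]
      ring

-- ===== VERDICT (by name: the statement is the Claim_ definition above) =====
theorem parse_light_spec : Claim_equal_parse_light := by
  intro light _
  unfold Spec_parse_light parse_light parse_light_alt
  rw [pvRangeDesc, pvFoldA, pvSumB light.toList 0 le_rfl]
  simp
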